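-- pv_equiv track=rewrite | github.com/unbe/aoc2023 | aoc13.py | solve
-- ===== SOURCE A (Python) =====
-- def solve(mir, target_diff):
--     summ = 0
--     for i in range(len(mir) - 1):
--         sz = min(i + 1, len(mir) - i - 1)
--         sl1 = mir[i+1-sz : i+1]
--         sl2 = mir[i+sz : i :-1]
--         diff = sum(c1 != c2 for (s1,s2) in zip(sl1, sl2) for(c1, c2) in zip(s1,s2))
--         if diff == target_diff:
--             summ += (i + 1)
--     return summ
-- ===== SOURCE B (Python) =====
-- def solve(mir, target_diff):
--     n = len(mir)
--     totals = [0] * (n - 1)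
--     # scatter pass: rows g apart (g odd) mirror across line a + (g-1)//2; walk each
--     # odd shift of the list against itself, skipping identical rows
--     for g in range(1, n, 2):
--         h = (g - 1) // 2
--         for k, (r, s) in enumerate(zip(mir, mir[g:]), start=h):
--             if r != s:
--                 d = 0
--                 for x, y in zip(r, s):
--                     if x != y:
--                         d += 1
--                 totals[k] += d
--     # gather pass: sum the positions of lines whose accumulated mismatch equals the target
--     return sum(i + 1 for i, t in enumerate(totals) if t == target_diff)
-- ===== Notes on version B (the rewrite author's own statement) =====
-- stated objective: alternative
-- what changed: A gathers per candidate line: for each line it slices the two sides (one reversed), zips them and counts mismatches inline; B inverts the iteration into a scatter over row pairs: for each odd shift g it walks zip(mir, mir[g:]) — every such pair mirrors across exactly one line a+(g-1)//2 — skipping identical rows and accumulating each pair's Hamming distance (explicit counting loop) into a totals array, then a separate gather pass sums the positions whose total equals the target.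
import Mathlib
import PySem

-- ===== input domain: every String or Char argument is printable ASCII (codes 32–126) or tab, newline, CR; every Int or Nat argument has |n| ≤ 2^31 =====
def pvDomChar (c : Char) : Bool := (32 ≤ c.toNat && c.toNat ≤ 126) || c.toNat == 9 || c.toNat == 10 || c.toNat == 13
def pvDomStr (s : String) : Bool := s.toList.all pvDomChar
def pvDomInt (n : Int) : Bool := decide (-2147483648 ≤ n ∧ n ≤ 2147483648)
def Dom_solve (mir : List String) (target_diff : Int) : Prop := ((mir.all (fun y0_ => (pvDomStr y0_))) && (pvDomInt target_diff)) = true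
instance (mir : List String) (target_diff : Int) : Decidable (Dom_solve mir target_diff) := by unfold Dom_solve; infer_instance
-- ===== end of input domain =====

-- B replaces A's per-line gather (slice both sides of each candidate line, one side
-- reversed, zip and count mismatches inline) by a scatter over row PAIRS: every pair
-- (a,b) with an odd gap adds its Hamming distance to a totals array at line (a+b)//2,
-- and a separate gather pass sums the qualifying line positions (objective: alternative).

-- ===== PORT A =====
-- literal transliteration of Source A's solve: one fold over range(len(mir)-1); slices,
-- zip and the boolean-sum comprehension ported step for step.
def solve (mir : List String) (target_diff : Int) : Int :=
  (PySem.List.pyRange 0 ((mir.length : Int) - 1) 1).foldl (fun summ i =>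
    let sz : Int := min (i + 1) ((mir.length : Int) - i - 1)
    let sl1 := PySem.List.slice mir (some (i + 1 - sz)) (some (i + 1))
    let sl2 := (PySem.List.slice? mir (some (i + sz)) (some i) (-1)).getD []
    let diff : Int := ((sl1.zip sl2).flatMap (fun p =>
      (p.1.toList.zip p.2.toList).map (fun q => if q.1 ≠ q.2 then (1 : Int) else 0))).sum
    if diff = target_diff then summ + (i + 1) else summ) 0

-- ===== PORT B =====
-- totals[k] += v  (the scatter index (a+b)//2 is always in range, proved below;
-- getD/set only make the update total)
def bumpB (t : List Int) (k : Nat) (v : Int) : List Int := t.set k (t.getD k 0 + v)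

-- transliteration of Source B's solve: for each odd shift g, walk enumerate(zip(mir, mir[g:]), start=(g-1)//2),
-- skip identical rows, count mismatches with an explicit loop and scatter into totals; then the gather pass.
def solve_alt (mir : List String) (target_diff : Int) : Int :=
  let n := mir.length
  let totals := (List.range' 1 (n / 2) 2).foldl (fun t (g : Nat) =>
    let h := (g - 1) / 2
    (PySem.List.enumerate (mir.zip (PySem.List.slice mir (some (g : Int)) none)) (h : Int)).foldl
      (fun t p =>
        if p.2.1 ≠ p.2.2 then
          let d := (p.2.1.toList.zip p.2.2.toList).foldl
            (fun d q => if q.1 ≠ q.2 then d + 1 else d) (0 : Int)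
          bumpB t p.1.toNat d
        else t) t) (List.replicate (n-1) 0)
  (PySem.List.enumerate totals).foldl (fun s p =>
    if p.2 = target_diff then s + (p.1 + 1) else s) 0

-- ===== PRECONDITION & SPEC =====
def Spec_solve (mir : List String) (target_diff : Int) (out : Int) : Prop := out = solve_alt mir target_diff
instance (mir : List String) (target_diff : Int) (out : Int) : Decidable (Spec_solve mir target_diff out) := by unfold Spec_solve; infer_instance

-- ===== CLAIM (what is proved, stated in full; the proofs are below) =====
def Claim_equal_solve : Prop := ∀ (mir : List String) (target_diff : Int), Dom_solve mir target_diff → Spec_solve mir target_diff (solve mir target_diff)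

-- ===== LEMMAS AND PROOFS =====

-- ---- A side: the slice-zip mismatch count of line i is the sum of pair distances ----

lemma take_drop_eq_map_range (xs : List String) (m c : Nat) (h : m + c ≤ xs.length) :
    (xs.drop m).take c = (List.range c).map (fun k => xs.getD (m + k) "") := by
  apply List.ext_getElem
  · simp; omega
  · intro n h1 h2
    simp [List.getElem_take, List.getElem_drop, List.getD_eq_getElem?_getD]
    rw [List.getElem?_eq_getElem (by simp at h1 ⊢; omega)]
    simp

-- the negative-step slice xs[a:b:-1] (b ≤ a < len) is a map over List.range
lemma slice_neg_one_eq_map_range (xs : List String) (a b : Nat) (hba : b ≤ a) (ha : a < xs.length) :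
    PySem.List.slice? xs (some (a : Int)) (some (b : Int)) (-1)
      = some ((List.range (a - b)).map (fun k => xs.getD (a - k) "")) := by
  have hlen : 1 ≤ xs.length := by omega
  have hma : min ((a : Nat) : Int) ((xs.length : Int) - 1) = (a : Int) := by omega
  have hmb : min ((b : Nat) : Int) ((xs.length : Int) - 1) = (b : Int) := by omega
  simp only [PySem.List.slice?, PySem.List.sliceIndices]
  split_ifs with h1 h2 h3 h4 h5 h6 <;> try omega
  · rw [hma, hmb] at *
    have hcount : (((a : Int) - b + -(-1) - 1) / -(-1)).toNat = a - b := by norm_num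
    rw [hcount]
    congr 1
    rw [← List.filterMap_eq_map]
    apply List.filterMap_congr
    intro k hk
    simp only [List.mem_range] at hk
    have hidx : ((a : Int) + -1 * (k : Int)).toNat = a - k := by omega
    rw [hidx]
    rw [List.getElem?_eq_getElem (by omega)]
    simp only [Function.comp_apply]
    rw [List.getD_eq_getElem _ _ (by omega)]
  · rw [hma, hmb] at *
    have : a = b := by omega
    simp [this]

lemma sum_flatMap {α : Type} (l : List α) (g : α → List Int) :
    (l.flatMap g).sum = (l.map (fun x => (g x).sum)).sum := by
  induction l with
  | nil => simp
  | cons h t ih => simp [ih]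

lemma sum_map_range (c : Nat) (f : Nat → Int) :
    ((List.range c).map f).sum = ∑ j ∈ Finset.range c, f j := rfl

-- indicator-sum form of a Hamming distance (proof-side value of each scatter update)
def hamB (r s : String) : Int :=
  ((r.toList.zip s.toList).map (fun q => if q.1 ≠ q.2 then (1 : Int) else 0)).sum

-- per candidate line, A's slice-zip mismatch count as a sum over the mirrored pairs
lemma diff_eq (mir : List String) (i' : Nat) (hi : i' < mir.length - 1) :
    (((PySem.List.slice mir (some ((i' : Int) + 1 - min ((i' : Int) + 1) ((mir.length : Int) - i' - 1))) (some ((i' : Int) + 1))).zip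
        ((PySem.List.slice? mir (some ((i' : Int) + min ((i' : Int) + 1) ((mir.length : Int) - i' - 1))) (some (i' : Int)) (-1)).getD [])).flatMap (fun p =>
      (p.1.toList.zip p.2.toList).map (fun q => if q.1 ≠ q.2 then (1 : Int) else 0))).sum
    = ∑ j ∈ Finset.range (min (i' + 1) (mir.length - 1 - i')),
        hamB (mir.getD (i' - j) "") (mir.getD (i' + 1 + j) "") := by
  set n := mir.length with hn
  set c : Nat := min (i' + 1) (n - 1 - i') with hc
  have hc1 : c ≤ i' + 1 := by omega
  have hc2 : i' + c ≤ n - 1 := by omega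
  have hn1 : i' + 1 < n := by omega
  have hsz : min ((i' : Int) + 1) ((n : Int) - i' - 1) = ((c : Nat) : Int) := by omega
  rw [hsz]
  have ha1 : (i' : Int) + 1 - ((c : Nat) : Int) = (((i' + 1 - c : Nat)) : Int) := by omega
  have ha2 : (i' : Int) + 1 = (((i' + 1 : Nat)) : Int) := by omega
  have ha3 : (i' : Int) + ((c : Nat) : Int) = (((i' + c : Nat)) : Int) := by omega
  rw [ha1, ha2, ha3, PySem.List.slice_natCast,
      slice_neg_one_eq_map_range mir (i' + c) i' (by omega) (by omega),
      show i' + 1 - (i' + 1 - c) = c by omega,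
      take_drop_eq_map_range mir (i' + 1 - c) c (by omega)]
  simp only [Option.getD_some, show i' + c - i' = c from by omega]
  rw [List.zip_map', List.flatMap_map, sum_flatMap]
  rw [sum_map_range]
  conv_lhs => rw [← Finset.sum_range_reflect]
  apply Finset.sum_congr rfl
  intro j hj
  simp only [Finset.mem_range] at hj
  have e1 : i' + 1 - c + (c - 1 - j) = i' - j := by omega
  have e2 : i' + c - (c - 1 - j) = i' + 1 + j := by omega
  rw [e1, e2]
  rfl

-- ---- B side: the scatter fold, flattened to one update list ----

-- ---- B side: the scatter fold, flattened to one update list ----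

def pairListB (mir : List String) : List (Nat × Int) :=
  (List.range' 1 (mir.length / 2) 2).flatMap (fun g =>
    (List.range (mir.length - g)).map (fun a =>
      ((g - 1) / 2 + a, hamB (mir.getD a "") (mir.getD (a + g) ""))))

lemma foldl_flatMap' {α β γ : Type} (l : List α) (g : α → List β) (f : γ → β → γ) (init : γ) :
    (l.flatMap g).foldl f init = l.foldl (fun acc a => (g a).foldl f acc) init := by
  induction l generalizing init with
  | nil => rfl
  | cons h t ih => simp [List.foldl_append, ih]

lemma length_bumpB (t : List Int) (k : Nat) (v : Int) : (bumpB t k v).length = t.length := by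
  simp [bumpB]

lemma getD_bumpB (t : List Int) (k : Nat) (v : Int) (hk : k < t.length) (i : Nat) :
    (bumpB t k v).getD i 0 = t.getD i 0 + if k = i then v else 0 := by
  by_cases h : k = i
  · subst h
    simp [bumpB, List.getD_eq_getElem?_getD, hk]
  · simp [bumpB, List.getD_eq_getElem?_getD, List.getElem?_set_ne h, h]

lemma zip_self_sum_zero (l : List Char) :
    ((l.zip l).map (fun q => if q.1 ≠ q.2 then (1 : Int) else 0)).sum = 0 := by
  induction l with
  | nil => rfl
  | cons h t ih => simpa using ih

lemma hamB_self (r : String) : hamB r r = 0 := zip_self_sum_zero r.toList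

lemma bumpB_zero (t : List Int) (k : Nat) (hk : k < t.length) : bumpB t k 0 = t := by
  rw [bumpB, add_zero, List.getD_eq_getElem t 0 hk]
  exact List.set_getElem_self hk

lemma foldl_congr_inv {α β : Type} (l : List β) (f g : α → β → α) (P : α → Prop) (t : α)
    (hinit : P t) (hpres : ∀ u x, x ∈ l → P u → P (g u x))
    (heq : ∀ u x, x ∈ l → P u → f u x = g u x) : l.foldl f t = l.foldl g t := by
  induction l generalizing t with
  | nil => rfl
  | cons x xs ih =>
    simp only [List.foldl_cons]
    rw [heq t x List.mem_cons_self hinit]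
    exact ih _ (hpres t x List.mem_cons_self hinit)
      (fun u y hy => hpres u y (List.mem_cons_of_mem _ hy))
      (fun u y hy => heq u y (List.mem_cons_of_mem _ hy))

lemma foldl_length_inv {β : Type} (l : List β) (step : List Int → β → List Int) :
    (∀ t x, x ∈ l → (step t x).length = t.length) → ∀ t : List Int,
    (l.foldl step t).length = t.length := by
  induction l with
  | nil => intro _ _; rfl
  | cons x xs ih =>
    intro h t
    rw [List.foldl_cons, ih (fun u y hy => h u y (List.mem_cons_of_mem _ hy)) _,
        h t x List.mem_cons_self]

-- Source B's explicit mismatch-counting loop is the indicator sum hamB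
lemma ham_loop_eq (r s : String) :
    (r.toList.zip s.toList).foldl (fun d q => if q.1 ≠ q.2 then d + 1 else d) (0 : Int)
      = hamB r s := by
  rw [PySem.List.foldl_ite_add_one, hamB]
  generalize r.toList.zip s.toList = l
  induction l with
  | nil => rfl
  | cons p t ih => by_cases hp : p.1 = p.2 <;> simp_all <;> ring

lemma range'_two_eq_map (s c : Nat) : List.range' s c 2 = (List.range c).map (fun k => s + 2*k) := by
  apply List.ext_getElem
  · simp
  · intro n h1 h2; simp [List.getElem_range']

lemma enumerate_eq_map_range {α : Type} (xs : List α) (s : Nat) (d : α) :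
    PySem.List.enumerate xs (s : Int)
      = (List.range xs.length).map (fun a => (((s + a : Nat) : Int), xs.getD a d)) := by
  apply List.ext_getElem
  · simp [PySem.List.length_enumerate]
  · intro k h1 h2
    have hk : k < xs.length := by simpa [PySem.List.length_enumerate] using h1
    rw [PySem.List.getElem_enumerate, List.getElem_map, List.getElem_range,
        List.getD_eq_getElem _ _ hk]
    refine Prod.ext ?_ rfl
    push_cast; ring

lemma zip_drop_length (mir : List String) (g : Nat) :
    (mir.zip (mir.drop g)).length = mir.length - g := by
  rw [List.length_zip, List.length_drop]; omega

lemma zip_drop_getD (mir : List String) (g a : Nat) (h : a < mir.length - g) :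
    (mir.zip (mir.drop g)).getD a ("","") = (mir.getD a "", mir.getD (a+g) "") := by
  rw [List.getD_eq_getElem _ _ (by simp; omega), List.getElem_zip]
  rw [List.getD_eq_getElem _ _ (by omega), List.getD_eq_getElem _ _ (by omega), List.getElem_drop]
  simp [Nat.add_comm]

-- the port's shift-and-zip scatter fold is the fold of the flat update list pairListB
-- (the equal-rows skip drops exactly the updates whose ham is 0)
lemma totals_eq_pairList (mir : List String) :
    (List.range' 1 (mir.length / 2) 2).foldl (fun t (g : Nat) =>
      (PySem.List.enumerate (mir.zip (PySem.List.slice mir (some (g : Int)) none)) ((Nat.cast ((g - 1) / 2) : Int))).foldl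
        (fun t p =>
          if p.2.1 ≠ p.2.2 then
            bumpB t p.1.toNat ((p.2.1.toList.zip p.2.2.toList).foldl
              (fun d q => if q.1 ≠ q.2 then d + 1 else d) (0 : Int))
          else t) t) (List.replicate (mir.length-1) 0)
    = (pairListB mir).foldl (fun u p => bumpB u p.1 p.2) (List.replicate (mir.length-1) 0) := by
  rw [pairListB, foldl_flatMap']
  apply foldl_congr_inv _ _ _ (fun t => t.length = mir.length - 1)
  · exact List.length_replicate
  · intro u g _ hu
    rw [foldl_length_inv _ _ (fun v p _ => length_bumpB v p.1 p.2) u, hu]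
  · intro u g hg hu
    obtain ⟨k0, hk0, rfl⟩ := List.mem_range'.mp hg
    have hg2 : (1 + 2 * k0 - 1) / 2 = k0 := by omega
    rw [PySem.List.slice_from_natCast, List.foldl_map,
        enumerate_eq_map_range (mir.zip (mir.drop (1 + 2*k0))) ((1 + 2*k0 - 1) / 2) ("",""),
        List.foldl_map, zip_drop_length]
    apply foldl_congr_inv _ _ _ (fun t => t.length = mir.length - 1) _ hu
    · intro v a _ hv
      rw [length_bumpB, hv]
    · intro v a ha hv
      have haz : a < mir.length - (1 + 2*k0) := List.mem_range.mp ha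
      rw [zip_drop_getD mir (1 + 2*k0) a haz]
      have hidx : (((((1 + 2*k0 - 1) / 2 + a : Nat)) : Int)).toNat = (1 + 2*k0 - 1) / 2 + a :=
        Int.toNat_natCast _
      by_cases hne : mir.getD a "" = mir.getD (a + (1 + 2*k0)) ""
      · rw [if_neg (by simpa using hne), hne, hamB_self,
            bumpB_zero _ _ (by rw [hv]; omega)]
      · rw [if_pos hne, hidx, ham_loop_eq]

lemma mem_pairListB (mir : List String) (p : Nat × Int) (hp : p ∈ pairListB mir) :
    p.1 < mir.length - 1 := by
  simp only [pairListB, List.mem_flatMap, List.mem_map, List.mem_range', List.mem_range] at hp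
  obtain ⟨g, ⟨k0, hk0, rfl⟩, a, ha, rfl⟩ := hp
  have : (1 + 2 * k0 - 1) / 2 = k0 := by omega
  omega

lemma foldl_bumpB_length (P : List (Nat × Int)) (t : List Int) :
    (P.foldl (fun u p => bumpB u p.1 p.2) t).length = t.length := by
  induction P generalizing t with
  | nil => rfl
  | cons h tl ih => simp [List.foldl_cons, ih, length_bumpB]

lemma foldl_bumpB_getD (P : List (Nat × Int)) (t : List Int) (i : Nat)
    (hP : ∀ p ∈ P, p.1 < t.length) :
    (P.foldl (fun u p => bumpB u p.1 p.2) t).getD i 0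
      = t.getD i 0 + (P.map (fun p => if p.1 = i then p.2 else 0)).sum := by
  induction P generalizing t with
  | nil => simp
  | cons h tl ih =>
    simp only [List.foldl_cons, List.map_cons, List.sum_cons]
    rw [ih _ (fun p hp => by rw [length_bumpB]; exact hP p (List.mem_cons_of_mem _ hp)),
        getD_bumpB t h.1 h.2 (hP h (List.mem_cons_self)) i]
    ring

-- the scatter contributions to line i are exactly the sum of its mirrored pair distances
lemma pairList_sum (mir : List String) (i : Nat) (_hi : i < mir.length - 1) :
    ((pairListB mir).map (fun p => if p.1 = i then p.2 else 0)).sum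
      = ∑ j ∈ Finset.range (min (i + 1) (mir.length - 1 - i)),
          hamB (mir.getD (i - j) "") (mir.getD (i + 1 + j) "") := by
  set n := mir.length with hn
  have collapse : ∀ (c m0 : Nat) (v : Int) (f : Nat → Int),
      (∀ m < c, f m = if m = m0 then v else 0) →
      ∑ m ∈ Finset.range c, f m = if m0 < c then v else 0 := by
    intro c m0 v f hf
    rw [Finset.sum_congr rfl (fun m hm => hf m (Finset.mem_range.mp hm)),
        Finset.sum_ite_eq' (Finset.range c) m0 (fun _ => v)]
    simp
  rw [pairListB, List.map_flatMap, sum_flatMap, range'_two_eq_map, List.map_map, sum_map_range]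
  simp only [Function.comp_def]
  have step : ∀ k : Nat, (((List.range (n - (1 + 2*k))).map (fun a =>
      ((1 + 2*k - 1) / 2 + a, hamB (mir.getD a "") (mir.getD (a + (1 + 2*k)) "")))).map
        (fun p => if p.1 = i then p.2 else 0)).sum
      = if k ≤ i ∧ i - k < n - (1 + 2*k)
        then hamB (mir.getD (i-k) "") (mir.getD ((i-k) + (1 + 2*k)) "") else 0 := by
    intro k
    have hg2 : (1 + 2 * k - 1) / 2 = k := by omega
    rw [List.map_map, sum_map_range]
    by_cases hki : k ≤ i
    · rw [collapse (n - (1+2*k)) (i - k)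
            (hamB (mir.getD (i-k) "") (mir.getD ((i-k) + (1 + 2*k)) "")) _ ?_]
      · split_ifs with h1 h2 h3 <;> first | rfl | omega
      · intro m _
        simp only [Function.comp_apply, hg2]
        split_ifs with h1 h2 h3 <;> first
          | rfl
          | (exfalso; omega)
          | (rw [show m = i - k from by omega])
    · rw [Finset.sum_eq_zero, if_neg (by omega)]
      intro m _
      simp only [Function.comp_apply, hg2]
      split_ifs with h1 <;> first | rfl | (exfalso; omega)
  rw [Finset.sum_congr rfl (fun k _ => step k)]
  have hsub : Finset.range (min (i + 1) (n - 1 - i)) ⊆ Finset.range (n / 2) := by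
    intro k hk
    simp only [Finset.mem_range] at hk ⊢
    omega
  rw [← Finset.sum_subset hsub (fun k hk1 hk2 => by
    simp only [Finset.mem_range] at hk1 hk2
    rw [if_neg (by omega)])]
  apply Finset.sum_congr rfl
  intro k hk
  simp only [Finset.mem_range] at hk
  rw [if_pos (by omega), show (i - k) + (1 + 2*k) = i + 1 + k from by omega]

-- ===== VERDICT (by name: the statement is the Claim_ definition above) =====
theorem solve_spec : Claim_equal_solve := by
  intro mir target_diff _
  unfold Spec_solve solve solve_alt
  dsimp only
  rcases Nat.eq_zero_or_pos mir.length with hn | hn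
  · rw [List.length_eq_zero_iff] at hn; subst hn; rfl
  · have hcast : ((mir.length : Int) - 1) = ((mir.length - 1 : Nat) : Int) := by omega
    set T := (List.range' 1 (mir.length / 2) 2).foldl (fun t (g : Nat) =>
      (PySem.List.enumerate (mir.zip (PySem.List.slice mir (some (g : Int)) none)) ((Nat.cast ((g - 1) / 2) : Int))).foldl
        (fun t p =>
          if p.2.1 ≠ p.2.2 then
            bumpB t p.1.toNat ((p.2.1.toList.zip p.2.2.toList).foldl
              (fun d q => if q.1 ≠ q.2 then d + 1 else d) (0 : Int))
          else t) t) (List.replicate (mir.length-1) 0) with hT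
    have hTlen : T.length = mir.length - 1 := by
      rw [hT, totals_eq_pairList, foldl_bumpB_length, List.length_replicate]
    have hTget : ∀ i' : Nat, i' < mir.length - 1 →
        T.getD i' 0 = ∑ j ∈ Finset.range (min (i' + 1) (mir.length - 1 - i')),
          hamB (mir.getD (i' - j) "") (mir.getD (i' + 1 + j) "") := by
      intro i' hi'
      rw [hT, totals_eq_pairList,
          foldl_bumpB_getD _ _ _ (fun p hp => by
            rw [List.length_replicate]; exact mem_pairListB mir p hp),
          pairList_sum mir i' hi']
      simp
    rw [hcast, PySem.List.pyRange_zero_natCast, List.foldl_map,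
        PySem.List.enumerate_eq_map_pyRange (d := 0),
        show PySem.List.len T = ((mir.length - 1 : Nat) : Int) from by simp [PySem.List.len, hTlen],
        PySem.List.pyRange_zero_natCast,
        List.map_map, List.foldl_map]
    apply PySem.List.foldl_congr_mem
    intro acc i' hmem
    have hi' : i' < mir.length - 1 := List.mem_range.mp hmem
    show (if _ = target_diff then acc + ((i' : Int) + 1) else acc)
       = (if _ = target_diff then acc + ((i' : Int) + 1) else acc)
    simp only [Function.comp_apply, PySem.List.pyGetD_natCast, hTget i' hi', diff_eq mir i' hi']
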